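-- pv_equiv track=rewrite | github.com/Rick-Wilson/BBA-CLI | integration-tests/compare_auctions.py | compare_auctions
-- ===== SOURCE A (Python) =====
-- def normalize_bid(bid):
--     """Normalize bid format for comparison."""
--     # 1N -> 1NT, 2N -> 2NT, etc.
--     bid = bid.upper()
--     if bid in ('1N', '2N', '3N', '4N', '5N', '6N', '7N'):
--         bid = bid + 'T'
--     return bid
--
-- def compare_auctions(ref_auction, our_auction):
--     """
--     Compare two auctions, return (match_type, first_diff_index).
--     match_type: 'full', 'partial', 'none'
--     """
--     # Normalize both auctions
--     ref_norm = [normalize_bid(b) for b in ref_auction]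
--     our_norm = [normalize_bid(b) for b in our_auction]
--
--     if ref_norm == our_norm:
--         return 'full', -1
--
--     # Find first difference
--     min_len = min(len(ref_norm), len(our_norm))
--     for i in range(min_len):
--         if ref_norm[i] != our_norm[i]:
--             return 'diff', i
--
--     # One is a prefix of the other
--     return 'len_diff', min_len
-- ===== SOURCE B (Python) =====
-- from itertools import zip_longest
--
-- def normalize_bid(bid):
--     """Normalize bid format for comparison."""
--     bid = bid.upper()
--     if bid in ('1N', '2N', '3N', '4N', '5N', '6N', '7N'):
--         bid = bid + 'T'
--     return bid
--
-- def compare_auctions(ref_auction, our_auction):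
--     """Single pass over both auctions with a unique sentinel fillvalue."""
--     sentinel = object()
--     for i, (r, o) in enumerate(zip_longest(ref_auction, our_auction, fillvalue=sentinel)):
--         if r is sentinel or o is sentinel:
--             return 'len_diff', i
--         if normalize_bid(r) != normalize_bid(o):
--             return 'diff', i
--     return 'full', -1
-- ===== Notes on version B (the rewrite author's own statement) =====
-- stated objective: simpler
-- what changed: Replaces A's up-front full-list normalization, whole-list equality test and separate index loop with one zip_longest scan over the raw lists using a unique sentinel, normalizing lazily and stopping at the first difference.
import Mathlib
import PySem

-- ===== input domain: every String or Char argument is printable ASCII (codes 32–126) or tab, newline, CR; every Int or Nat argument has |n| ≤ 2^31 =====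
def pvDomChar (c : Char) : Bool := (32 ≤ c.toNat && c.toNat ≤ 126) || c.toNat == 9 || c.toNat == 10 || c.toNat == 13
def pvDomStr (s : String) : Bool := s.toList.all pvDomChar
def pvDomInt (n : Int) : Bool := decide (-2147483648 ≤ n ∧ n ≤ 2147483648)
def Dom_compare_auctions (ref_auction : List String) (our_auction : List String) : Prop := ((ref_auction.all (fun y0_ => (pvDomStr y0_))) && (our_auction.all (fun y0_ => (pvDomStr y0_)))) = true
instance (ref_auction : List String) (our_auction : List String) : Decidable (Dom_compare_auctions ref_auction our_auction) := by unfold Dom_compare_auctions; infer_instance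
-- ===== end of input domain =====

-- B replaces A's up-front normalization + whole-list equality test + index loop by one
-- zip-style scan over both raw lists, normalizing lazily and stopping at the first difference
-- (simpler one-pass decomposition; return value only, no side effects).

-- ===== PORT A =====
def normalize_bid (bid : String) : String :=
  let bid := PySem.Str.upper bid
  if bid ∈ ["1N", "2N", "3N", "4N", "5N", "6N", "7N"] then bid ++ "T" else bid

-- the 'for i in range(min_len)' loop of A, as recursion on the index
def compareLoopA (ref_norm our_norm : List String) (min_len i : Nat) : String × Int :=
  if _h : i < min_len then
    if PySem.List.pyGet? ref_norm (i : Int) ≠ PySem.List.pyGet? our_norm (i : Int) then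
      ("diff", (i : Int))
    else compareLoopA ref_norm our_norm min_len (i + 1)
  else ("len_diff", (min_len : Int))
termination_by min_len - i

def compare_auctions (ref_auction : List String) (our_auction : List String) : String × Int :=
  let ref_norm := ref_auction.map normalize_bid
  let our_norm := our_auction.map normalize_bid
  if ref_norm = our_norm then ("full", -1)
  else compareLoopA ref_norm our_norm (min ref_norm.length our_norm.length) 0

-- ===== PORT B =====
-- B's zip_longest-with-sentinel loop: length mismatch ↔ a sentinel appears
def zipScanB : List String → List String → Nat → String × Int
  | r :: rs, o :: os, i =>
      if normalize_bid r ≠ normalize_bid o then ("diff", (i : Int))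
      else zipScanB rs os (i + 1)
  | [], [], _ => ("full", -1)
  | _, _, i => ("len_diff", (i : Int))

def compare_auctions_alt (ref_auction : List String) (our_auction : List String) : String × Int :=
  zipScanB ref_auction our_auction 0

-- ===== PRECONDITION & SPEC =====
def Spec_compare_auctions (ref_auction : List String) (our_auction : List String) (out : String × Int) : Prop := out = compare_auctions_alt ref_auction our_auction
instance (ref_auction : List String) (our_auction : List String) (out : String × Int) : Decidable (Spec_compare_auctions ref_auction our_auction out) := by unfold Spec_compare_auctions; infer_instance

-- ===== CLAIM (what is proved, stated in full; the proofs are below) =====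
def Claim_equal_compare_auctions : Prop := ∀ (ref_auction : List String) (our_auction : List String), Dom_compare_auctions ref_auction our_auction → Spec_compare_auctions ref_auction our_auction (compare_auctions ref_auction our_auction)

-- ===== LEMMAS AND PROOFS =====

-- proof-only helper: B's scan on the already-normalized lists
def zscan : List String → List String → Nat → String × Int
  | r :: rs, o :: os, i =>
      if r ≠ o then ("diff", (i : Int)) else zscan rs os (i + 1)
  | [], [], _ => ("full", -1)
  | _, _, i => ("len_diff", (i : Int))

theorem zipScanB_eq_zscan : ∀ (r o : List String) (i : Nat),
    zipScanB r o i = zscan (r.map normalize_bid) (o.map normalize_bid) i := by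
  intro r
  induction r with
  | nil => intro o i; cases o <;> simp [zipScanB, zscan]
  | cons a as ih =>
    intro o i
    cases o with
    | nil => simp [zipScanB, zscan]
    | cons b bs =>
      simp only [zipScanB, zscan, List.map]
      split_ifs <;> simp_all

theorem zscan_self : ∀ (R : List String) (i : Nat), zscan R R i = ("full", -1) := by
  intro R
  induction R with
  | nil => intro i; rfl
  | cons a as ih => intro i; simp [zscan, ih]

theorem main_loop : ∀ (R O : List String), R ≠ O →
    ∀ (n i : Nat), i + n = min R.length O.length → R.take i = O.take i →
    compareLoopA R O (min R.length O.length) i = zscan (R.drop i) (O.drop i) i := by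
  intro R O hne n
  induction n with
  | zero =>
    intro i hmin htake
    simp only [Nat.add_zero] at hmin
    rw [compareLoopA]
    rw [dif_neg (by omega)]
    have hor : R.length ≤ i ∨ O.length ≤ i := by omega
    have : R.drop i = [] ∨ O.drop i = [] := by
      rcases hor with h | h
      · exact Or.inl (List.drop_eq_nil_of_le h)
      · exact Or.inr (List.drop_eq_nil_of_le h)
    match hR : R.drop i, hO : O.drop i with
    | [], [] =>
      exfalso
      have hRl : R.length ≤ i := by
        have := congrArg List.length hR; simp at this; omega
      have hOl : O.length ≤ i := by
        have := congrArg List.length hO; simp at this; omega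
      apply hne
      calc R = R.take i := (List.take_of_length_le hRl).symm
        _ = O.take i := htake
        _ = O := List.take_of_length_le hOl
    | [], _ :: _ => simp [zscan, hmin]
    | _ :: _, [] => simp [zscan, hmin]
    | a :: as, b :: bs =>
      exfalso
      rcases this with h | h <;> simp_all
  | succ n ih =>
    intro i hmin htake
    have hiR : i < R.length := by omega
    have hiO : i < O.length := by omega
    rw [compareLoopA, dif_pos (by omega)]
    rw [List.drop_eq_getElem_cons hiR, List.drop_eq_getElem_cons hiO]
    rw [PySem.List.pyGet?_natCast, PySem.List.pyGet?_natCast,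
        List.getElem?_eq_getElem hiR, List.getElem?_eq_getElem hiO]
    by_cases hEq : R[i] = O[i]
    · rw [if_neg (by simp [hEq]), zscan, if_neg (by simp [hEq])]
      apply ih (i + 1) (by omega)
      rw [List.take_add_one, List.take_add_one, htake,
          List.getElem?_eq_getElem hiR, List.getElem?_eq_getElem hiO, hEq]
    · rw [if_pos (by simp [hEq]), zscan, if_pos hEq]

-- ===== VERDICT (by name: the statement is the Claim_ definition above) =====
theorem compare_auctions_spec : Claim_equal_compare_auctions := by
  intro ref our _dom
  unfold Spec_compare_auctions compare_auctions compare_auctions_alt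
  rw [zipScanB_eq_zscan]
  by_cases h : ref.map normalize_bid = our.map normalize_bid
  · simp only [h, if_pos trivial, zscan_self]
  · simp only [if_neg h]
    have := main_loop (ref.map normalize_bid) (our.map normalize_bid) h
      (min (ref.map normalize_bid).length (our.map normalize_bid).length) 0
      (by omega) (by simp)
    simpa using this
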